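-- pv_equiv track=rewrite | github.com/Seren666/EmailClassifiction | assemble_structured_output.py | _normalized_markers
-- ===== SOURCE A (Python) =====
-- from typing import Any, Iterable, Sequence
--
-- def _normalized_markers(markers: Sequence[str]) -> set[str]:
--     cleaned = {
--         marker.strip()
--         for marker in markers
--         if marker and marker.strip() and not marker.strip().isdigit()
--     }
--     if cleaned:
--         return cleaned
--     return {
--         marker.strip()
--         for marker in markers
--         if marker and marker.strip()
--     }
-- ===== SOURCE B (Python) =====
-- def _normalized_markers(markers):
--     # One pass, state machine: start in "loose" mode collecting every stripped
--     # marker; on the first non-digit marker switch to "strict" mode, dropping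
--     # the digit-only strings collected so far and keeping only non-digits.
--     result = set()
--     strict = False
--     for m in markers:
--         if not m:
--             continue
--         s = m.strip()
--         if not s:
--             continue
--         if s.isdigit():
--             if not strict:
--                 result.add(s)
--         else:
--             if not strict:
--                 result = set()
--                 strict = True
--             result.add(s)
--     return result
-- ===== Notes on version B (the rewrite author's own statement) =====
-- stated objective: alternative
-- what changed: B replaces A's two independent set-comprehension passes (strict set, then a loose fallback re-scan) with one imperative pass over the markers holding a single result set and a mode flag: it collects every stripped marker until the first non-digit appears, at which point it drops the digit-only strings and keeps only non-digits from then on.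
import Mathlib
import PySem

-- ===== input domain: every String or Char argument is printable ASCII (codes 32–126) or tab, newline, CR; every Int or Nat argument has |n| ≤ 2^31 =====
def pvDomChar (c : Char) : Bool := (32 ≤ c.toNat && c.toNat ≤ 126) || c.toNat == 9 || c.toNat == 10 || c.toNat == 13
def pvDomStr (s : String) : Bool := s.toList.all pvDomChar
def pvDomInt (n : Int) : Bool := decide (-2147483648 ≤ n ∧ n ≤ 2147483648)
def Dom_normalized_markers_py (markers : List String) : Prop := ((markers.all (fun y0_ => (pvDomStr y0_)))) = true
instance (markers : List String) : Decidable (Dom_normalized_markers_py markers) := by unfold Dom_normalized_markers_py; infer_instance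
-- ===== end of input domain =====

-- B replaces A's two set-comprehension passes (strict, then loose fallback) by ONE imperative pass
-- with a mode flag that drops collected digit-only strings at the first non-digit marker (objective: alternative).

-- ===== PORT A =====
-- A's strict comprehension predicate + add, as one fold step
def nmStrict (s : PySem.Set String) (marker : String) : PySem.Set String :=
  if marker ≠ "" ∧ PySem.Str.strip marker ≠ "" ∧ ¬ (PySem.Str.strIsdigit (PySem.Str.strip marker) = true)
  then PySem.Set.add s (PySem.Str.strip marker) else s

-- A's loose (fallback) comprehension predicate + add, as one fold step
def nmLoose (s : PySem.Set String) (marker : String) : PySem.Set String :=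
  if marker ≠ "" ∧ PySem.Str.strip marker ≠ ""
  then PySem.Set.add s (PySem.Str.strip marker) else s

def normalized_markers_py (markers : List String) : List String :=
  let cleaned : PySem.Set String := markers.foldl nmStrict PySem.Set.empty
  if cleaned ≠ [] then cleaned
  else markers.foldl nmLoose PySem.Set.empty

-- ===== PORT B =====
-- one step of B's loop over the state (result, strict-flag)
def nmStep (st : List String × Bool) (m : String) : List String × Bool :=
  if m = "" then st
  else
    let s := PySem.Str.strip m
    if s = "" then st
    else if PySem.Str.strIsdigit s = true then
      (if st.2 then st else (PySem.Set.add st.1 s, st.2))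
    else
      (PySem.Set.add (if st.2 then st.1 else PySem.Set.empty) s, true)

def normalized_markers_py_alt (markers : List String) : List String :=
  (markers.foldl nmStep (PySem.Set.empty, false)).1

-- ===== PRECONDITION & SPEC =====
def Spec_normalized_markers_py (markers : List String) (out : List String) : Prop := out = normalized_markers_py_alt markers
instance (markers : List String) (out : List String) : Decidable (Spec_normalized_markers_py markers out) := by unfold Spec_normalized_markers_py; infer_instance

-- ===== CLAIM =====
def Claim_equal_normalized_markers_py : Prop := ∀ (markers : List String), Dom_normalized_markers_py markers → Spec_normalized_markers_py markers (normalized_markers_py markers)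

-- ===== LEMMAS AND PROOFS =====

-- In strict mode B's loop is exactly A's strict fold.
theorem nmStep_strict (ms : List String) (acc : List String) :
    ms.foldl nmStep (acc, true) = (ms.foldl nmStrict acc, true) := by
  induction ms generalizing acc with
  | nil => rfl
  | cons m ms ih =>
    simp only [List.foldl_cons, nmStep, nmStrict]
    by_cases h1 : m = ""
    · simp [h1, ih]
    · by_cases h2 : PySem.Str.strip m = ""
      · simp [h1, h2, ih]
      · by_cases h3 : PySem.Str.strIsdigit (PySem.Str.strip m) = true
        · have h3' : PySem.Chars.strIsdigit (PySem.Chars.strip m.toList) = true := by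
            simpa using h3
          simp [h1, h2, h3', ih]
        · have h3' : PySem.Chars.strIsdigit (PySem.Chars.strip m.toList) = false := by
            simpa using h3
          simp [h1, h2, h3', ih]

-- The strict fold never shrinks its accumulator.
theorem nmStrict_len (ms : List String) (acc : List String) :
    acc.length ≤ (ms.foldl nmStrict acc).length := by
  induction ms generalizing acc with
  | nil => simp
  | cons m ms ih =>
    refine le_trans ?_ (ih (nmStrict acc m))
    simp only [nmStrict, PySem.Set.add]
    split_ifs <;> simp

-- Invariant for B's loose mode: the result is A's strict set if that is non-empty, else A's loose set.
theorem nmStep_loose (ms : List String) (acc : List String) :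
    (ms.foldl nmStep (acc, false)).1
      = if ms.foldl nmStrict [] = [] then ms.foldl nmLoose acc else ms.foldl nmStrict [] := by
  induction ms generalizing acc with
  | nil => rfl
  | cons m ms ih =>
    simp only [List.foldl_cons]
    by_cases h1 : m = ""
    · rw [show nmStep (acc, false) m = (acc, false) by simp [nmStep, h1],
        show nmStrict [] m = [] by simp [nmStrict, h1],
        show nmLoose acc m = acc by simp [nmLoose, h1], ih]
    · by_cases h2 : PySem.Str.strip m = ""
      · rw [show nmStep (acc, false) m = (acc, false) by simp [nmStep, h1, h2],
          show nmStrict [] m = [] by simp [nmStrict, h1, h2],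
          show nmLoose acc m = acc by simp [nmLoose, h1, h2], ih]
      · by_cases h3 : PySem.Str.strIsdigit (PySem.Str.strip m) = true
        · have h3' : PySem.Chars.strIsdigit (PySem.Chars.strip m.toList) = true := by
            simpa using h3
          rw [show nmStep (acc, false) m = (PySem.Set.add acc (PySem.Str.strip m), false) by
              simp [nmStep, h1, h2, h3'],
            show nmStrict [] m = [] by simp [nmStrict, h1, h2, h3'],
            show nmLoose acc m = PySem.Set.add acc (PySem.Str.strip m) by simp [nmLoose, h1, h2], ih]
        · have h3' : PySem.Chars.strIsdigit (PySem.Chars.strip m.toList) = false := by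
            simpa using h3
          have hne : ms.foldl nmStrict (PySem.Set.add [] (PySem.Str.strip m)) ≠ [] := by
            intro h
            have := nmStrict_len ms (PySem.Set.add [] (PySem.Str.strip m))
            rw [h] at this
            simp [PySem.Set.add, PySem.Set.contains] at this
          rw [show nmStep (acc, false) m = (PySem.Set.add PySem.Set.empty (PySem.Str.strip m), true) by
              simp [nmStep, h1, h2, h3'],
            show nmStrict [] m = PySem.Set.add [] (PySem.Str.strip m) by simp [nmStrict, h1, h2, h3'],
            nmStep_strict, if_neg hne]
          simp [PySem.Set.empty]

-- ===== VERDICT =====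
theorem normalized_markers_py_spec : Claim_equal_normalized_markers_py := by
  intro markers _
  unfold Spec_normalized_markers_py normalized_markers_py normalized_markers_py_alt
  rw [nmStep_loose]
  by_cases h : markers.foldl nmStrict [] = []
  · simp [PySem.Set.empty, h]
  · simp [PySem.Set.empty, h]
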